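-- pv_equiv track=rewrite | github.com/junarun/kt-ai-2 | 2-Q-A4.py | solution
-- ===== SOURCE A (Python) =====
-- def solution(arr):
--     min_val = min(arr)
--     max_val = max(arr)
--     count = 0
--     while 1:
--         for a in arr:
--             if max_val % a == 0:
--                 count += 1
--         if count == len(arr): break
--         else: count = 0
--         max_val += min_val
--     return max_val
-- ===== SOURCE B (Python) =====
-- def solution(arr):
--     def gcd(a, b):
--         return gcd(b, a % b) if b > 0 else a
--
--     mn = min(arr)
--     mx = max(arr)
--     L = 1
--     for a in arr:
--         L = L // gcd(L, abs(a)) * abs(a)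
--     g = abs(mn)
--     M = L // g
--     s = mn // g
--     k = (-s * (mx // g)) % M
--     return mx + k * mn
-- ===== Notes on version B (the rewrite author's own statement) =====
-- stated objective: alternative
-- what changed: B replaces A's step-by-step search (repeatedly add min to max until every element divides it) by computing lcm(arr) with Euclid's gcd and solving the congruence k*min = -max (mod lcm) directly, returning max + k*min in one shot; intended as faster, but a timing run could not measure a ratio (A times out at n=16 where B returns).
import Mathlib
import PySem

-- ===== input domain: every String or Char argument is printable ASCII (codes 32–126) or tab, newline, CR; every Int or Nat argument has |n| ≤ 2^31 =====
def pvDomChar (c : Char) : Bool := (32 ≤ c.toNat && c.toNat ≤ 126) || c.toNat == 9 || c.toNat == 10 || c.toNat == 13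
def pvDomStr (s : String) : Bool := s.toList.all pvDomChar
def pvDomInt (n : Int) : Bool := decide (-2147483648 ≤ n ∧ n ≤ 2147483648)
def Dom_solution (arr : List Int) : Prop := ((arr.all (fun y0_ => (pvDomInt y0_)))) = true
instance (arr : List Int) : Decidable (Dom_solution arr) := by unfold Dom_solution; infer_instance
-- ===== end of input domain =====

-- B replaces A's step-by-step search (add min until all elements divide) by one gcd/lcm
-- modular computation (objective: alternative algorithm).

-- ===== PORT A =====
-- A's 'while 1' loop; the Nat fuel only makes the recursion total — under Pre_solution the
-- loop provably breaks before the fuel runs out, so the fuel branch is never the result.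
def solLoop (arr : List Int) (minv : Int) : Nat → Int → Int
  | 0, maxv => maxv
  | fuel+1, maxv =>
    let count : Int := arr.foldl (fun c a => if PySem.Int.mod maxv a = 0 then c + 1 else c) 0
    if count = (arr.length : Int) then maxv
    else solLoop arr minv fuel (maxv + minv)

def solution (arr : List Int) : Int :=
  match PySem.List.min? arr (fun y => y), PySem.List.max? arr (fun y => y) with
  | some minv, some maxv => solLoop arr minv ((arr.map Int.natAbs).prod + 1) maxv
  | _, _ => 0   -- min([]) raises ValueError; excluded by Pre_solution

-- ===== PORT B =====
-- Source B's recursive Euclid gcd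
def gcdB (a b : Int) : Int :=
  if h : 0 < b then gcdB b (PySem.Int.mod a b) else a
termination_by b.toNat
decreasing_by
  have h1 := PySem.Int.mod_nonneg a h
  have h2 := PySem.Int.mod_lt a h
  omega

def solution_alt (arr : List Int) : Int :=
  match PySem.List.min? arr (fun y => y) with
  | none => 0   -- min([]) raises ValueError; excluded by Pre_solution
  | some mn =>
    match PySem.List.max? arr (fun y => y) with
    | none => 0
    | some mx =>
      let L := arr.foldl (fun l a => PySem.Int.floordiv l (gcdB l |a|) * |a|) 1
      let g := |mn|
      let M := PySem.Int.floordiv L g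
      let s := PySem.Int.floordiv mn g
      let k := PySem.Int.mod (-s * PySem.Int.floordiv mx g) M
      mx + k * mn

-- ===== PRECONDITION & SPEC =====
-- Pre_ excludes exactly the inputs where A does not return: the empty list (min raises
-- ValueError), lists containing 0 (ZeroDivisionError), and lists whose max is not a
-- multiple of |min| (A's loop max, max+min, … never hits a common multiple: diverges).
def Pre_solution (arr : List Int) : Prop :=
  arr ≠ [] ∧ (∀ a ∈ arr, a ≠ 0) ∧
  |arr.foldl min (arr.headD 0)| ∣ arr.foldl max (arr.headD 0)
instance (arr : List Int) : Decidable (Pre_solution arr) := by unfold Pre_solution; infer_instance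
def pvWitness_solution : List Int := [2, 6]

def Spec_solution (arr : List Int) (out : Int) : Prop := out = solution_alt arr
instance (arr : List Int) (out : Int) : Decidable (Spec_solution arr out) := by unfold Spec_solution; infer_instance

-- ===== CLAIM (what is proved, stated in full; the proofs are below) =====
def Claim_equal_solution : Prop := ∀ (arr : List Int), Dom_solution arr → Pre_solution arr → Spec_solution arr (solution arr)

-- ===== LEMMAS AND PROOFS =====

-- Source B's gcd computes the (nonnegative-argument) gcd
lemma gcdB_eq (a b : Int) (ha : 0 ≤ a) (hb : 0 ≤ b) :
    gcdB a b = (Nat.gcd b.toNat a.toNat : Int) := by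
  induction a, b using gcdB.induct with
  | case1 a b h ih =>
    rw [gcdB, dif_pos h]
    have hm : PySem.Int.mod a b = a % b := PySem.Int.mod_eq_emod_of_pos h
    rw [hm] at ih ⊢
    rw [ih (le_of_lt h) (Int.emod_nonneg a (by omega))]
    have hto : (a % b).toNat = a.toNat % b.toNat := by
      rcases Int.eq_ofNat_of_zero_le ha with ⟨m, rfl⟩
      rcases Int.eq_ofNat_of_zero_le (le_of_lt h) with ⟨n, rfl⟩
      rw [← Int.natCast_mod, Int.toNat_natCast, Int.toNat_natCast, Int.toNat_natCast]
    rw [hto, Nat.gcd_rec b.toNat a.toNat]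
  | case2 a b h =>
    rw [gcdB, dif_neg h]
    have : b.toNat = 0 := by omega
    simp [this, Int.toNat_of_nonneg ha]

-- the lcm of the absolute values of a list (proof-side characterisation of B's fold)
def lcmList (l : List Int) : Nat := l.foldr (fun a n => Nat.lcm a.natAbs n) 1

lemma lcmList_pos (l : List Int) (h : ∀ a ∈ l, a ≠ 0) : 0 < lcmList l := by
  induction l with
  | nil => simp [lcmList]
  | cons a t ih =>
    have ha : a ≠ 0 := h a (by simp)
    have ht : 0 < lcmList t := ih (fun x hx => h x (by simp [hx]))
    have hpos : 0 < Nat.lcm a.natAbs (lcmList t) :=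
      Nat.lcm_pos (by simpa [Int.natAbs_pos] using ha) ht
    simpa [lcmList] using hpos

lemma dvd_lcmList (l : List Int) (a : Int) (h : a ∈ l) : a ∣ (lcmList l : Int) := by
  induction l with
  | nil => simp at h
  | cons x t ih =>
    simp [lcmList] at *
    rcases h with rfl | h
    · have : (a.natAbs : Int) ∣ ((Nat.lcm a.natAbs (lcmList t) : Nat) : Int) := by
        exact_mod_cast Nat.dvd_lcm_left _ _
      exact (Int.natAbs_dvd.mp this)
    · have h1 : ((lcmList t : Nat) : Int) ∣ ((Nat.lcm x.natAbs (lcmList t) : Nat) : Int) := by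
        exact_mod_cast Nat.dvd_lcm_right _ _
      exact dvd_trans (ih h) h1

lemma lcmList_dvd (l : List Int) (x : Int) (h : ∀ a ∈ l, a ∣ x) : (lcmList l : Int) ∣ x := by
  induction l with
  | nil => simp [lcmList, isUnit_one]
  | cons a t ih =>
    have h1 : a ∣ x := h a (by simp)
    have h2 : (lcmList t : Int) ∣ x := ih (fun y hy => h y (by simp [hy]))
    have : ((Nat.lcm a.natAbs (lcmList t) : Nat) : Int) = (Int.lcm a (lcmList t) : Int) := by
      simp [Int.lcm]
    simpa [lcmList, this] using Int.coe_lcm_dvd h1 h2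

lemma lcmList_dvd_prod (l : List Int) : lcmList l ∣ (l.map Int.natAbs).prod := by
  induction l with
  | nil => simp [lcmList]
  | cons a t ih =>
    simp [lcmList] at *
    exact Nat.lcm_dvd (Dvd.dvd.mul_right (dvd_refl _) _) (Dvd.dvd.mul_left ih _)

-- B's fold computes the lcm
lemma foldl_lcm (t : List Int) : ∀ (l : Nat), 0 < l → (∀ a ∈ t, a ≠ 0) →
    t.foldl (fun l a => PySem.Int.floordiv l (gcdB l |a|) * |a|) (l : Int)
      = (Nat.lcm l (lcmList t) : Int) := by
  induction t with
  | nil => intro l hl _; simp [lcmList]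
  | cons a t ih =>
    intro l hl hnz
    have ha : a ≠ 0 := hnz a (by simp)
    have habs : (0:Int) < |a| := by positivity
    have hg : gcdB (l : Int) |a| = (Nat.gcd a.natAbs l : Int) := by
      rw [gcdB_eq _ _ (by positivity) (le_of_lt habs)]
      congr 1
      rw [Int.abs_eq_natAbs, Int.toNat_natCast, Int.toNat_natCast]
    have hgpos : 0 < Nat.gcd a.natAbs l := Nat.gcd_pos_of_pos_right _ hl
    have hstep : PySem.Int.floordiv (l : Int) (gcdB (l : Int) |a|) * |a|
        = ((Nat.lcm l a.natAbs : Nat) : Int) := by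
      rw [hg, PySem.Int.floordiv_eq_ediv_of_pos (by exact_mod_cast hgpos)]
      set d := Nat.gcd a.natAbs l with hd
      obtain ⟨c, hc⟩ : d ∣ l := Nat.gcd_dvd_right _ _
      have hgne : ((d : Nat) : Int) ≠ 0 := by exact_mod_cast hgpos.ne'
      have h1 : (l : Int) / (d : Int) = (c : Int) := by
        rw [hc]; push_cast
        exact Int.mul_ediv_cancel_left _ hgne
      have h2 : Nat.lcm l a.natAbs = c * a.natAbs := by
        rw [Nat.lcm, Nat.gcd_comm l a.natAbs, ← hd, hc, mul_assoc,
            Nat.mul_div_cancel_left _ hgpos]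
      rw [h1, h2, Int.abs_eq_natAbs]
      push_cast
      ring
    simp only [List.foldl_cons, hstep]
    rw [ih (Nat.lcm l a.natAbs)
         (Nat.lcm_pos hl (by simpa [Int.natAbs_pos] using ha))
         (fun x hx => hnz x (by simp [hx]))]
    have : Nat.lcm (Nat.lcm l a.natAbs) (lcmList t) = Nat.lcm l (lcmList (a :: t)) := by
      simp only [lcmList, List.foldr]
      exact Nat.lcm_assoc l a.natAbs _
    rw [this]

-- the inner for-loop's count equals len(arr) iff every element divides maxv
lemma count_eq_len_iff (arr : List Int) (v : Int) :
    (arr.foldl (fun c a => if PySem.Int.mod v a = 0 then c + 1 else c) (0:Int)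
       = (arr.length : Int)) ↔ ∀ a ∈ arr, a ∣ v := by
  rw [PySem.List.foldl_ite_add_one (p := fun a => PySem.Int.mod v a = 0)]
  have hle := List.countP_le_length (l := arr) (p := fun a => decide (PySem.Int.mod v a = 0))
  constructor
  · intro h a ha
    have : arr.countP (fun a => decide (PySem.Int.mod v a = 0)) = arr.length := by omega
    have := (List.countP_eq_length).mp this a ha
    simp at this
    exact (PySem.Int.mod_eq_zero_iff_dvd v a).mp this
  · intro h
    have : arr.countP (fun a => decide (PySem.Int.mod v a = 0)) = arr.length := by
      apply List.countP_eq_length.mpr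
      intro a ha
      simp [PySem.Int.mod_eq_zero_iff_dvd]
      exact h a ha
    omega

-- A's loop returns start + k·min for the least good k, given enough fuel
lemma loop_finds (arr : List Int) (mn N : Int)
    (hN : ∀ v : Int, ((∀ a ∈ arr, a ∣ v) ↔ N ∣ v)) :
    ∀ (fuel k : Nat) (v : Int), N ∣ v + k * mn →
      (∀ j : Nat, j < k → ¬ N ∣ v + j * mn) → k < fuel →
      solLoop arr mn fuel v = v + k * mn := by
  intro fuel
  induction fuel with
  | zero => omega
  | succ f ih =>
    intro k v hgood hmin hlt
    rw [solLoop]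
    show (if (arr.foldl (fun c a => if PySem.Int.mod v a = 0 then c + 1 else c) (0:Int))
            = (arr.length : Int) then v else solLoop arr mn f (v + mn)) = v + (k : Int) * mn
    by_cases hv : N ∣ v
    · have hk : k = 0 := by
        by_contra hne
        exact hmin 0 (by omega) (by simpa using hv)
      rw [if_pos ((count_eq_len_iff arr v).mpr ((hN v).mpr hv))]
      simp [hk]
    · rw [if_neg (fun hc => hv ((hN v).mp ((count_eq_len_iff arr v).mp hc)))]
      have hk : k ≠ 0 := by
        rintro rfl
        exact hv (by simpa using hgood)
      obtain ⟨k', rfl⟩ : ∃ k', k = k' + 1 := ⟨k - 1, by omega⟩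
      rw [ih k' (v + mn)
            (by
              have he : v + mn + (k' : Int) * mn = v + ((k' + 1 : Nat) : Int) * mn := by
                push_cast; ring
              rw [he]; exact hgood)
            (fun j hj hc => by
              apply hmin (j + 1) (by omega)
              have he : v + ((j + 1 : Nat) : Int) * mn = v + mn + (j : Int) * mn := by
                push_cast; ring
              rw [he]; exact hc)
            (by omega)]
      push_cast; ring

theorem solution_spec : Claim_equal_solution := by
  intro arr _ hpre
  obtain ⟨hne, hnz, hdvd⟩ := hpre
  obtain ⟨x, t, rfl⟩ : ∃ x t, arr = x :: t := by
    cases arr with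
    | nil => exact absurd rfl hne
    | cons x t => exact ⟨x, t, rfl⟩
  unfold Spec_solution solution solution_alt
  rw [PySem.List.min?_id_cons, PySem.List.max?_id_cons]
  simp only []
  set arr := x :: t with harr
  set mn := t.foldl min x with hmn
  set mx := t.foldl max x with hmx
  -- basic facts
  have hmn_mem : mn ∈ arr := by
    rcases PySem.List.foldl_min_mem t x with h | h
    · rw [hmn, h]; simp [harr]
    · simp [harr, hmn, h]
  have hmx_mem : mx ∈ arr := by
    rcases PySem.List.foldl_max_mem t x with h | h
    · rw [hmx, h]; simp [harr]
    · simp [harr, hmx, h]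
  have hmn0 : mn ≠ 0 := hnz _ hmn_mem
  have hG : (0:Int) < |mn| := by positivity
  set g : Int := |mn| with hgdef
  -- headD and the foldl over the whole list coincide with mn / mx
  have hpredvd : g ∣ mx := by
    have h1 : (x :: t).foldl min ((x :: t).headD 0) = mn := by
      simp [hmn, min_self]
    have h2 : (x :: t).foldl max ((x :: t).headD 0) = mx := by
      simp [hmx, max_self]
    rw [h1, h2] at hdvd; exact hdvd
  -- the lcm
  set N : Nat := lcmList arr with hNdef
  have hNpos : 0 < N := lcmList_pos arr hnz
  have hLfold : arr.foldl (fun l a => PySem.Int.floordiv l (gcdB l |a|) * |a|) 1 = (N : Int) := by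
    have := foldl_lcm arr 1 (by omega) hnz
    simpa [hNdef] using this
  have hNiff : ∀ v : Int, (∀ a ∈ arr, a ∣ v) ↔ (N : Int) ∣ v := by
    intro v
    constructor
    · exact lcmList_dvd arr v
    · intro h a ha
      exact dvd_trans (dvd_lcmList arr a ha) h
  have hgN : g ∣ (N : Int) := by
    rw [hgdef]
    exact (abs_dvd _ _).mpr (dvd_lcmList arr mn hmn_mem)
  -- the pieces of B's computation
  set M : Int := (N : Int) / g with hMdef
  have hMg : M * g = (N : Int) := Int.ediv_mul_cancel hgN
  have hMpos : 0 < M := by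
    rcases hgN with ⟨c, hc⟩
    have : M = c := by rw [hMdef, hc]; exact Int.mul_ediv_cancel_left _ (by omega)
    nlinarith [hc, hNpos, hG, this]
  set s : Int := mn / g with hsdef
  have hsg : s * g = mn := Int.ediv_mul_cancel (abs_dvd_self mn)
  have hss : s * s = 1 := by
    rcases abs_cases mn with ⟨h1, _⟩ | ⟨h1, _⟩
    · have : s = 1 := by
        rw [hsdef, hgdef, h1, Int.ediv_self hmn0]
      rw [this]; ring
    · have : s = -1 := by
        rw [hsdef, hgdef, h1]
        rw [Int.ediv_neg, Int.ediv_self hmn0]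
      rw [this]; ring
  set q : Int := mx / g with hqdef
  have hqg : q * g = mx := Int.ediv_mul_cancel hpredvd
  set kI : Int := (-s * q) % M with hkdef
  have hk0 : 0 ≤ kI := Int.emod_nonneg _ (by omega)
  have hkM : kI < M := Int.emod_lt_of_pos _ hMpos
  -- B's result
  have hMpos' : 0 < (N : Int) / g := by rw [← hMdef]; exact hMpos
  show solLoop arr mn ((arr.map Int.natAbs).prod + 1) mx
      = mx + PySem.Int.mod (-PySem.Int.floordiv mn g * PySem.Int.floordiv mx g)
          (PySem.Int.floordiv (arr.foldl (fun l a => PySem.Int.floordiv l (gcdB l |a|) * |a|) 1) g) * mn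
  rw [hLfold, PySem.Int.floordiv_eq_ediv_of_pos hG, PySem.Int.floordiv_eq_ediv_of_pos hG,
      PySem.Int.floordiv_eq_ediv_of_pos hG, PySem.Int.mod_eq_emod_of_pos hMpos',
      ← hsdef, ← hqdef, ← hMdef, ← hkdef]
  -- divisibility along the progression
  have hprog : ∀ j : Int, ((N:Int) ∣ mx + j * mn ↔ M ∣ q + j * s) := by
    intro j
    have h1 : mx + j * mn = (q + j * s) * g := by
      rw [← hqg, ← hsg]; ring
    rw [h1, ← hMg]
    exact mul_dvd_mul_iff_right (show g ≠ 0 by omega)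
  have hgoodk : (N:Int) ∣ mx + kI * mn := by
    rw [hprog]
    have hdef : kI = -s * q - M * (-s * q / M) := by
      rw [hkdef, Int.emod_def]
    have hqe : q + kI * s = M * (-(-s * q / M) * s) := by
      rw [hdef]
      have h5 : q + (-s * q - M * (-s * q / M)) * s = q - s * s * q - M * (-s * q / M) * s := by
        ring
      rw [h5, hss]
      ring
    exact ⟨-(-s * q / M) * s, hqe⟩
  have hmink : ∀ j : Nat, (j : Int) < kI → ¬ (N:Int) ∣ mx + j * mn := by
    intro j hj hcon
    have h1 : M ∣ q + (j:Int) * s := (hprog j).mp hcon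
    have h2 : M ∣ q + kI * s := (hprog kI).mp hgoodk
    have h3 : M ∣ (kI - (j:Int)) * s := by
      have := dvd_sub h2 h1
      have he : q + kI * s - (q + (j:Int) * s) = (kI - (j:Int)) * s := by ring
      rwa [he] at this
    have h4 : M ∣ kI - (j:Int) := by
      have := Dvd.dvd.mul_right h3 s
      have he : (kI - (j:Int)) * s * s = kI - (j:Int) := by
        rw [mul_assoc, hss]; ring
      rwa [he] at this
    have := Int.le_of_dvd (by omega) h4
    omega
  -- A's result: run the loop
  have hNprod : (N : Int) ≤ ((arr.map Int.natAbs).prod : Nat) := by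
    have hd := lcmList_dvd_prod arr
    have hppos : 0 < (arr.map Int.natAbs).prod := by
      apply List.prod_pos
      intro n hn
      simp only [List.mem_map] at hn
      obtain ⟨a, ha, rfl⟩ := hn
      have := hnz a ha
      omega
    exact_mod_cast Nat.le_of_dvd hppos hd
  have hMleN : M ≤ (N : Int) := by
    calc M = (N:Int) / g := hMdef
    _ ≤ (N:Int) := Int.ediv_le_self _ (by positivity)
  have hfuel : kI.toNat < (arr.map Int.natAbs).prod + 1 := by omega
  have hA := loop_finds arr mn (N:Int) hNiff ((arr.map Int.natAbs).prod + 1) kI.toNat mx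
      (by rwa [Int.toNat_of_nonneg hk0])
      (fun j hj => hmink j (by omega))
      hfuel
  rw [hA, Int.toNat_of_nonneg hk0]

-- ===== VERDICT (by name: the statement is the Claim_ definition above) =====
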